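-- pv_equiv track=rewrite | github.com/kanuos/python-programs | Dictionary Programs/MirrorCharacters.py | calculate_mirror_character
-- ===== SOURCE A (Python) =====
-- def calculate_mirror_character(char):
--     alphabet = [chr(x) for x in range(65, 91)]
--     if char.islower():
--         char = char.upper()
--     if char.isalpha():
--         if 'M' >= char >= 'A':
--             position = (alphabet.index(char)) + 1
--             return alphabet[-1 * position]
--         position = 25 - alphabet.index(char)
--         return alphabet[position]
--     return char
-- ===== SOURCE B (Python) =====
-- def calculate_mirror_character(char):
--     if char.islower():
--         char = char.upper()
--     if char.isalpha():
--         return chr(155 - ord(char))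
--     return char
-- ===== Notes on version B (the rewrite author's own statement) =====
-- stated objective: simpler
-- what changed: B drops A's 26-entry alphabet table, the .index() scans and the two symmetric A-M / N-Z branches, computing the mirror of an alphabetic character directly as chr(155 - ord(char)) after the same islower()/upper() normalization.
import Mathlib
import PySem

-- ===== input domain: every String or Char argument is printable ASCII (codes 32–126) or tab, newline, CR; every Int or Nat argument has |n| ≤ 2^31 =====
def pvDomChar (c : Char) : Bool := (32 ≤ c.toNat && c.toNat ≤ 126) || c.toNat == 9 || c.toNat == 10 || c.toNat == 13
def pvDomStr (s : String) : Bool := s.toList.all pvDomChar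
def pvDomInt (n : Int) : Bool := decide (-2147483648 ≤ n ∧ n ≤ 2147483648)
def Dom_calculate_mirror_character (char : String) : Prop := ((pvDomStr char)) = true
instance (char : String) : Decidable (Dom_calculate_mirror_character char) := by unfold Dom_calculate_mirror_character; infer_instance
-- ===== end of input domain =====

-- B replaces A's alphabet table + .index() lookups by the closed-form mirror chr(155 - ord(char)) (simpler; return value only).

-- ===== PORT A =====
-- transliteration of Python str.islower() (not in PySem): at least one cased character and no
-- uppercase cased character; cased = alphabetic, exact on the ASCII domain. Used by both ports
-- (both Python sources contain the identical two normalization lines).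
def pyStrIslower (s : String) : Bool :=
  s.toList.any PySem.Chars.isalpha && !(s.toList.any PySem.Chars.isupper)

def calculate_mirror_character (char : String) : String :=
  -- alphabet = [chr(x) for x in range(65, 91)]
  let alphabet : List String := (PySem.List.pyRange 65 91 1).map (fun x => String.ofList [Char.ofNat x.toNat])
  let char := if pyStrIslower char then PySem.Str.upper char else char
  if PySem.Str.strIsalpha char then
    -- 'M' >= char >= 'A'  (Python string comparison, ported via PySem.Chars.strLt on code points)
    if !PySem.Chars.strLt "M".toList char.toList && !PySem.Chars.strLt char.toList "A".toList then
      -- position = alphabet.index(char) + 1; return alphabet[-1 * position]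
      let position : Int := ((PySem.List.index? alphabet char).getD 0 : Int) + 1   -- .index raises ValueError when absent (excluded by Pre_)
      (PySem.List.pyGet? alphabet (-1 * position)).getD ""
    else
      -- position = 25 - alphabet.index(char); return alphabet[position]
      let position : Int := 25 - ((PySem.List.index? alphabet char).getD 0 : Int)
      (PySem.List.pyGet? alphabet position).getD ""
  else char

-- ===== PORT B =====
def calculate_mirror_character_alt (char : String) : String :=
  let char := if pyStrIslower char then PySem.Str.upper char else char
  if PySem.Str.strIsalpha char then
    -- chr(155 - ord(char)); ord() raises TypeError unless char is a single character (excluded by Pre_)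
    match char.toList with
    | [c] => String.ofList [Char.ofNat (155 - c.toNat)]
    | _ => ""
  else char

-- ===== PRECONDITION & SPEC =====
-- On a multi-character alphabetic argument A raises ValueError (alphabet.index) and B raises
-- TypeError (ord), so Pre_ requires alphabetic input to be a single character.
def Pre_calculate_mirror_character (char : String) : Prop :=
  PySem.Str.strIsalpha char = true → char.toList.length = 1
instance (char : String) : Decidable (Pre_calculate_mirror_character char) := by
  unfold Pre_calculate_mirror_character; infer_instance
def pvWitness_calculate_mirror_character : String := "g"

def Spec_calculate_mirror_character (char : String) (out : String) : Prop := out = calculate_mirror_character_alt char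
instance (char : String) (out : String) : Decidable (Spec_calculate_mirror_character char out) := by unfold Spec_calculate_mirror_character; infer_instance

-- ===== CLAIM (what is proved, stated in full; the proofs are below) =====
def Claim_equal_calculate_mirror_character : Prop := ∀ (char : String), Dom_calculate_mirror_character char → Pre_calculate_mirror_character char → Spec_calculate_mirror_character char (calculate_mirror_character char)

-- ===== LEMMAS AND PROOFS =====

-- isalpha is invariant under upperChar, for domain characters
lemma isalpha_upperChar_dom (c : Char) (h : pvDomChar c = true) :
    PySem.Chars.isalpha (PySem.Chars.upperChar c) = PySem.Chars.isalpha c := by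
  have hc : Char.ofNat c.toNat = c := Char.ofNat_toNat c
  simp only [pvDomChar, Bool.or_eq_true, Bool.and_eq_true, decide_eq_true_eq, beq_iff_eq] at h
  rw [← hc]
  set n := c.toNat with hn
  clear_value n
  rcases h with ((⟨h1, h2⟩ | h) | h) | h
  · interval_cases n <;> decide
  · subst h; decide
  · subst h; decide
  · subst h; decide

-- the two ports agree on every single-character domain string
lemma single_char_eq (c : Char) (h : pvDomChar c = true) :
    calculate_mirror_character (String.ofList [c]) = calculate_mirror_character_alt (String.ofList [c]) := by
  have hc : Char.ofNat c.toNat = c := Char.ofNat_toNat c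
  simp only [pvDomChar, Bool.or_eq_true, Bool.and_eq_true, decide_eq_true_eq, beq_iff_eq] at h
  rw [← hc]
  set n := c.toNat with hn
  clear_value n
  rcases h with ((⟨h1, h2⟩ | h) | h) | h
  · interval_cases n <;> decide
  · subst h; decide
  · subst h; decide
  · subst h; decide

-- ===== VERDICT (by name: the statement is the Claim_ definition above) =====
theorem calculate_mirror_character_spec : Claim_equal_calculate_mirror_character := by
  intro char hdom hpre
  unfold Spec_calculate_mirror_character
  unfold Dom_calculate_mirror_character pvDomStr at hdom
  have hofl : String.ofList char.toList = char := String.ofList_toList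
  match htl : char.toList, hdom with
  | [], _ =>
      rw [← hofl, htl]; decide
  | [c], hdom =>
      rw [← hofl, htl]
      exact single_char_eq c (by simpa using hdom)
  | c1 :: c2 :: rest, hdom =>
      -- length ≥ 2: Pre_ forces the string to be non-alphabetic, both ports return it (normalized) unchanged
      have hna : PySem.Str.strIsalpha char = false := by
        by_contra hcon
        have ht : PySem.Str.strIsalpha char = true := by
          cases hx : PySem.Str.strIsalpha char with
          | false => exact absurd hx hcon
          | true => rfl
        have := hpre ht
        rw [htl] at this
        simp at this
      have hna' : PySem.Str.strIsalpha
          (if pyStrIslower char then PySem.Str.upper char else char) = false := by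
        split
        · -- upper branch: isalpha is invariant under upper on the domain
          rw [PySem.Str.strIsalpha_eq, PySem.Str.toList_upper]
          rw [PySem.Str.strIsalpha_eq] at hna
          simp only [PySem.Chars.strIsalpha, PySem.Chars.upper, Bool.and_eq_false_iff,
            List.all_map, htl] at hna ⊢
          rcases hna with hne | hall
          · simp at hne
          · right
            rw [List.all_eq_false] at hall ⊢
            obtain ⟨x, hx, hfx⟩ := hall
            refine ⟨x, hx, ?_⟩
            simp only [Function.comp_apply]
            rw [isalpha_upperChar_dom x ?_]
            · simpa using hfx
            · simp only [List.all_eq_true] at hdom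
              exact hdom x hx
        · exact hna
      unfold calculate_mirror_character calculate_mirror_character_alt
      simp only [hna', Bool.false_eq_true, if_false]
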